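-- pv_equiv track=rewrite | github.com/asburr/bigIsland | discovery/src/JSONParser.py | ishexdump
-- ===== SOURCE A (Python) =====
-- def ishexdump(s: str) -> bool:
--     i = 0
--     e = len(s)
--     retval = False
--     while True:
--         if i == e:
--             return retval
--         if (
--                 (s[i] >= '0' and s[i] <= '9') or
--                 (s[i] >= 'a' and s[i] <= 'f')
--             ):
--             i += 1
--         else:
--             return False
--         if i == e:
--             return retval
--         if (
--                 (s[i] >= '0' and s[i] <= '9') or
--                 (s[i] >= 'a' and s[i] <= 'f')
--             ):
--             i += 1
--             retval = True
--         else: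
--             return False
--         if i == e:
--             return retval
--         if s[i] == ":":
--             i += 1
--         else:
--             return False
--     return retval
-- ===== SOURCE B (Python) =====
-- def ishexdump(s: str) -> bool:
--     parts = s.split(':')
--     hexdigits = set('0123456789abcdef')
--     for p in parts[:-1]:
--         if len(p) != 2 or any(c not in hexdigits for c in p):
--             return False
--     last = parts[-1]
--     if len(last) > 2 or any(c not in hexdigits for c in last):
--         return False
--     return len(parts) > 1 or len(last) == 2
-- ===== Notes on version B (the rewrite author's own statement) =====
-- stated objective: simpler
-- what changed: Replaced the hand-rolled per-character state machine (hex, hex, colon, with a retval flag) by a tokenize-then-validate pass: split on ':' and check every part except the last is exactly two lowercase hex digits and the last is at most two, accepting iff at least one complete byte was present.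
import Mathlib
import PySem

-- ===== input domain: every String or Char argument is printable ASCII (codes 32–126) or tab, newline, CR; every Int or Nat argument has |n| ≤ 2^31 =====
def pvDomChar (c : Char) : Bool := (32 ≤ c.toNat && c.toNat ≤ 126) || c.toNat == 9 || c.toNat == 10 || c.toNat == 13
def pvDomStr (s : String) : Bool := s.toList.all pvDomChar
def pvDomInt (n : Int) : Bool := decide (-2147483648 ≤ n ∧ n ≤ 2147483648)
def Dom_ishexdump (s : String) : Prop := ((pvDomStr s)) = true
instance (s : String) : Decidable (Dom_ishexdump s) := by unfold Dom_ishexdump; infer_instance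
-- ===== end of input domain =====

-- B replaces A's per-character state machine by a split-on-':'-then-validate pass (objective: simpler).

-- ===== PORT A =====
-- A's hex test: (s[i] >= '0' and s[i] <= '9') or (s[i] >= 'a' and s[i] <= 'f')
def hexA (c : Char) : Bool := (('0' ≤ c && c ≤ '9') || ('a' ≤ c && c ≤ 'f'))

-- A's while loop: state = remaining characters (position i) and retval
def ishexdumpLoop : List Char → Bool → Bool
  | [], retval => retval
  | c :: rest, retval =>
    if hexA c then
      match rest with
      | [] => retval
      | c2 :: rest2 =>
        if hexA c2 then
          match rest2 with
          | [] => true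
          | c3 :: rest3 =>
            if c3 = ':' then ishexdumpLoop rest3 true else false
        else false
    else false

def ishexdump (s : String) : Bool := ishexdumpLoop s.toList false

-- ===== PORT B =====
-- B's hex test: 'c in hexdigits' ('0123456789abcdef')
def hexB (c : Char) : Bool := c ∈ "0123456789abcdef".toList

-- negation of 'len(p) != 2 or any(c not in hexdigits for c in p)'
def partOk (p : List Char) : Bool := p.length == 2 && p.all hexB

-- negation of 'len(last) > 2 or any(c not in hexdigits for c in last)'
def lastOk (p : List Char) : Bool := decide (p.length ≤ 2) && p.all hexB

def ishexdump_alt (s : String) : Bool :=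
  let parts := PySem.Chars.splitOn s.toList [':']
  if !(parts.dropLast.all partOk) then false
  else
    let last := parts.getLastD []
    if !(lastOk last) then false
    else decide (1 < parts.length) || (last.length == 2)

-- ===== PRECONDITION & SPEC =====
def Spec_ishexdump (s : String) (out : Bool) : Prop := out = ishexdump_alt s
instance (s : String) (out : Bool) : Decidable (Spec_ishexdump s out) := by unfold Spec_ishexdump; infer_instance

-- ===== CLAIM (what is proved, stated in full; the proofs are below) =====
def Claim_equal_ishexdump : Prop := ∀ (s : String), Dom_ishexdump s → Spec_ishexdump s (ishexdump s)

-- ===== LEMMAS AND PROOFS =====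

-- structural respecification of split on ':'
def splitCh : List Char → List (List Char)
  | [] => [[]]
  | c :: r => if c = ':' then [] :: splitCh r
              else (c :: (splitCh r).headD []) :: (splitCh r).tail

lemma splitCh_ne_nil (cs : List Char) : splitCh cs ≠ [] := by
  cases cs with
  | nil => simp [splitCh]
  | cons c r => simp only [splitCh]; split <;> simp

lemma go_spec (fuel : Nat) (cs cur : List Char) (acc : List (List Char))
    (h : cs.length < fuel) :
    PySem.Chars.splitOn.go [':'] fuel cs cur acc
      = acc.reverse ++ (splitCh cs).modifyHead (cur.reverse ++ ·) := by
  induction fuel generalizing cs cur acc with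
  | zero => omega
  | succ f ih =>
    cases cs with
    | nil => simp [PySem.Chars.splitOn.go, splitCh]
    | cons c r =>
      by_cases hc : c = ':'
      · subst hc
        simp only [PySem.Chars.splitOn.go, List.isPrefixOf, BEq.rfl, Bool.true_and,
          if_true, List.length_cons, List.length_nil, List.drop_succ_cons, List.drop_zero]
        rw [ih r [] (cur.reverse :: acc) (by simp at h ⊢; omega)]
        cases hsp : splitCh r with
        | nil => exact absurd hsp (splitCh_ne_nil r)
        | cons p ps => simp [splitCh, hsp]
      · have hpre : [':'].isPrefixOf (c :: r) = false := by
          simp [List.isPrefixOf]; exact fun h => absurd h.symm hc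
        simp only [PySem.Chars.splitOn.go, hpre]
        rw [ih r (c :: cur) acc (by simp at h ⊢; omega)]
        cases hsp : splitCh r with
        | nil => exact absurd hsp (splitCh_ne_nil r)
        | cons p ps => simp [splitCh, hsp, hc]

lemma splitOn_eq_splitCh (cs : List Char) :
    PySem.Chars.splitOn cs [':'] = splitCh cs := by
  unfold PySem.Chars.splitOn
  rw [go_spec cs.length.succ cs [] [] (by omega)]
  cases hsp : splitCh cs with
  | nil => exact absurd hsp (splitCh_ne_nil cs)
  | cons p ps => simp

lemma char_toNat_val (c : Char) : c.val.toNat = c.toNat := rfl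

-- the two hex tests agree
lemma hex_eq (c : Char) : hexB c = hexA c := by
  have hA : hexA c = decide (48 ≤ c.toNat ∧ c.toNat ≤ 57 ∨ 97 ≤ c.toNat ∧ c.toNat ≤ 102) := by
    simp only [hexA, Char.le_def, UInt32.le_iff_toNat_le, show ('0':Char).val.toNat = 48 from rfl,
      show ('9':Char).val.toNat = 57 from rfl, show ('a':Char).val.toNat = 97 from rfl,
      show ('f':Char).val.toNat = 102 from rfl, char_toNat_val, Bool.decide_and, Bool.decide_or]
  have hB : hexB c = decide (c.toNat = 48 ∨ c.toNat = 49 ∨ c.toNat = 50 ∨ c.toNat = 51 ∨ c.toNat = 52 ∨ c.toNat = 53 ∨ c.toNat = 54 ∨ c.toNat = 55 ∨ c.toNat = 56 ∨ c.toNat = 57 ∨ c.toNat = 97 ∨ c.toNat = 98 ∨ c.toNat = 99 ∨ c.toNat = 100 ∨ c.toNat = 101 ∨ c.toNat = 102) := by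
    have h : "0123456789abcdef".toList = ['0','1','2','3','4','5','6','7','8','9','a','b','c','d','e','f'] := rfl
    simp only [hexB, h, List.mem_cons, List.not_mem_nil, or_false, Char.ext_iff, UInt32.ext_iff,
      char_toNat_val, show ('0':Char).val.toNat = 48 from rfl, show ('1':Char).val.toNat = 49 from rfl,
      show ('2':Char).val.toNat = 50 from rfl, show ('3':Char).val.toNat = 51 from rfl,
      show ('4':Char).val.toNat = 52 from rfl, show ('5':Char).val.toNat = 53 from rfl,
      show ('6':Char).val.toNat = 54 from rfl, show ('7':Char).val.toNat = 55 from rfl,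
      show ('8':Char).val.toNat = 56 from rfl, show ('9':Char).val.toNat = 57 from rfl,
      show ('a':Char).val.toNat = 97 from rfl, show ('b':Char).val.toNat = 98 from rfl,
      show ('c':Char).val.toNat = 99 from rfl, show ('d':Char).val.toNat = 100 from rfl,
      show ('e':Char).val.toNat = 101 from rfl, show ('f':Char).val.toNat = 102 from rfl]
  rw [hA, hB, decide_eq_decide]
  omega

lemma hexA_ne_colon {c : Char} (h : hexA c = true) : c ≠ ':' := by
  rintro rfl; simp [hexA] at h

-- B's check, generalized over A's retval flag
def checkB (parts : List (List Char)) (r : Bool) : Bool :=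
  parts.dropLast.all partOk && lastOk (parts.getLastD [])
    && (r || decide (1 < parts.length) || ((parts.getLastD []).length == 2))

lemma checkB_first_long (p : List Char) (ps : List (List Char)) (r : Bool)
    (h : 2 < p.length) : checkB (p :: ps) r = false := by
  cases ps with
  | nil => simp [checkB, lastOk]; omega
  | cons q qs => simp [checkB, partOk]; intro h2; omega

lemma checkB_first_nonhex (c : Char) (p : List Char) (ps : List (List Char)) (r : Bool)
    (hc : hexB c = false) (hmem : c ∈ p) : checkB (p :: ps) r = false := by
  cases ps with
  | nil =>
    simp [checkB, lastOk]
    intro _ h; exact absurd (h c hmem) (by simp [hc])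
  | cons q qs =>
    simp [checkB, partOk]
    intro _ h; exact absurd (h c hmem) (by simp [hc])

lemma main_loop (cs : List Char) (r : Bool) :
    ishexdumpLoop cs r = checkB (splitCh cs) r := by
  induction cs, r using ishexdumpLoop.induct with
  | case1 r =>
    simp [ishexdumpLoop, splitCh, checkB, lastOk]
  | case2 c r hc =>
    -- single hex char, end of string
    have h1 : c ≠ ':' := hexA_ne_colon hc
    simp [ishexdumpLoop, splitCh, h1, checkB, lastOk, hex_eq, hc]
  | case3 c r hc c2 hc2 =>
    -- exactly two hex chars, end of string
    have h1 : c ≠ ':' := hexA_ne_colon hc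
    have h2 : c2 ≠ ':' := hexA_ne_colon hc2
    simp [ishexdumpLoop, hc, hc2, splitCh, h1, h2, checkB, lastOk, hex_eq]
  | case4 c r hc c2 hc2 rest3 ih =>
    -- two hex chars then ':'
    have h1 : c ≠ ':' := hexA_ne_colon hc
    have h2 : c2 ≠ ':' := hexA_ne_colon hc2
    simp only [ishexdumpLoop, hc, hc2, if_true]
    rw [ih]
    cases hsp : splitCh rest3 with
    | nil => exact absurd hsp (splitCh_ne_nil rest3)
    | cons p ps =>
      simp only [splitCh, h1, h2, if_true, if_false, hsp]
      simp [checkB, partOk, hex_eq, hc, hc2]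
  | case5 c r hc c2 hc2 c3 rest3 hc3 =>
    -- two hex chars then a non-colon: the first part has ≥ 3 chars
    have h1 : c ≠ ':' := hexA_ne_colon hc
    have h2 : c2 ≠ ':' := hexA_ne_colon hc2
    simp only [ishexdumpLoop, hc, hc2, hc3, if_true, if_false]
    cases hsp : splitCh rest3 with
    | nil => exact absurd hsp (splitCh_ne_nil rest3)
    | cons p ps =>
      simp only [splitCh, h1, h2, hc3, if_false, hsp]
      exact (checkB_first_long _ _ r (by simp)).symm
  | case6 c r hc c2 rest2 hc2 =>
    -- second char not hex
    have h1 : c ≠ ':' := hexA_ne_colon hc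
    have hB2 : hexA c2 = false := Bool.eq_false_iff.mpr hc2
    have hcB : hexB c2 = false := by rw [hex_eq]; exact hB2
    rw [ishexdumpLoop.eq_def]
    simp only [hc, hB2, if_true, Bool.false_eq_true, if_false]
    by_cases hcol : c2 = ':'
    · subst hcol
      cases hsp : splitCh rest2 with
      | nil => exact absurd hsp (splitCh_ne_nil rest2)
      | cons p ps =>
        simp only [splitCh, h1, if_false, if_true, hsp]
        cases ps <;> simp [checkB, partOk]
    · cases hsp : splitCh rest2 with
      | nil => exact absurd hsp (splitCh_ne_nil rest2)
      | cons p ps =>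
        simp only [splitCh, h1, hcol, if_false, hsp]
        exact (checkB_first_nonhex c2 _ _ r hcB (by simp)).symm
  | case7 c rest r hc =>
    -- first char not hex
    have hBc : hexA c = false := Bool.eq_false_iff.mpr hc
    have hcB : hexB c = false := by rw [hex_eq]; exact hBc
    rw [ishexdumpLoop.eq_def]
    simp only [hBc, Bool.false_eq_true, if_false]
    by_cases hcol : c = ':'
    · subst hcol
      cases hsp : splitCh rest with
      | nil => exact absurd hsp (splitCh_ne_nil rest)
      | cons p ps =>
        simp only [splitCh, if_true, hsp]
        cases ps <;> simp [checkB, partOk]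
    · cases hsp : splitCh rest with
      | nil => exact absurd hsp (splitCh_ne_nil rest)
      | cons p ps =>
        simp only [splitCh, hcol, if_false, hsp]
        exact (checkB_first_nonhex c _ _ r hcB (by simp)).symm

lemma alt_eq_checkB (s : String) : ishexdump_alt s = checkB (splitCh s.toList) false := by
  simp only [ishexdump_alt, splitOn_eq_splitCh, checkB]
  cases (splitCh s.toList).dropLast.all partOk
  · simp
  · cases lastOk ((splitCh s.toList).getLastD []) <;> simp

-- ===== VERDICT (by name: the statement is the Claim_ definition above) =====
theorem ishexdump_spec : Claim_equal_ishexdump := by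
  intro s _
  unfold Spec_ishexdump ishexdump
  rw [alt_eq_checkB, main_loop]
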